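-- pv_equiv track=rewrite | github.com/martin-tii/sentinel-guard | src/policy.py | _host_in_rules
-- ===== SOURCE A (Python) =====
-- def _host_in_rules(host, rules):
--     for rule in rules:
--         rule = str(rule).strip()
--         if not rule:
--             continue
--         if host == rule or host.endswith("." + rule):
--             return True
--     return False
-- ===== SOURCE B (Python) =====
-- def _host_in_rules(host, rules):
--     # Build the set of cleaned rules once, then test the host and each
--     # dot-suffix of the host by set membership.
--     rs = set()
--     for rule in rules:
--         r = str(rule).strip()
--         if r:
--             rs.add(r)
--     if host in rs:
--         return True
--     for i in range(len(host)):
--         if host[i] == "." and host[i + 1:] in rs: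
--             return True
--     return False
-- ===== Notes on version B (the rewrite author's own statement) =====
-- stated objective: alternative
-- what changed: Instead of scanning every rule and running endswith per rule, B builds a set of stripped rules once and tests the host and each of its dot-suffixes by set membership.
import Mathlib
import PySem

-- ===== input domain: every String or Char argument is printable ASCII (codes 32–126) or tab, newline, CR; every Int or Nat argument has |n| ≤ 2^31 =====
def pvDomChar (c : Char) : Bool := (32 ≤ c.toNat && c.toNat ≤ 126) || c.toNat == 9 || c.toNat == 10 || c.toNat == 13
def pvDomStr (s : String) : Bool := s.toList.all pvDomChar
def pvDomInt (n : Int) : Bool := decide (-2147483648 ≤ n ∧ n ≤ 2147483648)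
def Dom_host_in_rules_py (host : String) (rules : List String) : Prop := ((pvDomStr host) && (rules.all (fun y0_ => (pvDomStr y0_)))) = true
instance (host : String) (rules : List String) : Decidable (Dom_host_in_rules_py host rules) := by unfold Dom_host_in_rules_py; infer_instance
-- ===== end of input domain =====

-- B replaces A's per-rule endswith scan by one set of stripped rules plus
-- membership tests of the host and each of its dot-suffixes (objective: alternative).


-- ===== PORT A =====
-- A's loop over rules (strings handled as List Char throughout; PySem.Chars is
-- the exact model of Python's str operations):
def hirALoop (h : List Char) : List (List Char) → Bool
  | [] => false
  | r :: rest =>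
    let rule := PySem.Chars.strip r
    if rule = [] then hirALoop h rest                 -- 'if not rule: continue'
    else if h = rule || PySem.Chars.endswith h ('.' :: rule) then true
    else hirALoop h rest

def host_in_rules_py (host : String) (rules : List String) : Bool :=
  hirALoop host.toList (rules.map String.toList)

-- ===== PORT B =====
-- B's first loop: rs = set(); for rule in rules: r = rule.strip(); if r: rs.add(r)
def hirBSet (rules : List (List Char)) : PySem.Set (List Char) :=
  rules.foldl (fun s r =>
    let t := PySem.Chars.strip r
    if t = [] then s else PySem.Set.add s t) PySem.Set.empty

-- B's second loop: for i in range(len(host)): if host[i] == "." and host[i+1:] in rs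
def host_in_rules_py_alt (host : String) (rules : List String) : Bool :=
  let rs := hirBSet (rules.map String.toList)
  let h := host.toList
  if PySem.Set.contains rs h then true
  else (List.range h.length).any (fun i =>
    (PySem.List.pyGet? h (i : Int) == some '.') &&    -- host[i] == "."
    PySem.Set.contains rs (h.drop (i + 1)))           -- host[i+1:] in rs (slice_from_natCast)

-- ===== PRECONDITION & SPEC =====
def Spec_host_in_rules_py (host : String) (rules : List String) (out : Bool) : Prop := out = host_in_rules_py_alt host rules
instance (host : String) (rules : List String) (out : Bool) : Decidable (Spec_host_in_rules_py host rules out) := by unfold Spec_host_in_rules_py; infer_instance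

-- ===== CLAIM (what is proved, stated in full; the proofs are below) =====
def Claim_equal_host_in_rules_py : Prop := ∀ (host : String) (rules : List String), Dom_host_in_rules_py host rules → Spec_host_in_rules_py host rules (host_in_rules_py host rules)

-- ===== LEMMAS AND PROOFS =====

-- A's loop returns true iff some rule matches exactly or as a dot-suffix.
theorem hirALoop_true_iff (h : List Char) (rules : List (List Char)) :
    hirALoop h rules = true ↔
      ∃ r ∈ rules, PySem.Chars.strip r ≠ [] ∧
        (h = PySem.Chars.strip r ∨ PySem.Chars.endswith h ('.' :: PySem.Chars.strip r) = true) := by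
  induction rules with
  | nil => simp [hirALoop]
  | cons r rest ih =>
    simp only [hirALoop]
    split_ifs with h1 h2
    · simp [ih, h1]
    · simp only [true_iff]
      exact ⟨r, List.mem_cons_self, h1, by simpa using h2⟩
    · simp only [ih, List.mem_cons]
      constructor
      · rintro ⟨x, hx, hne, hor⟩; exact ⟨x, Or.inr hx, hne, hor⟩
      · rintro ⟨x, hx | hx, hne, hor⟩
        · subst hx; exact absurd (by simpa using hor) h2
        · exact ⟨x, hx, hne, hor⟩

-- membership in B's rule set
theorem mem_hirBSet (t : List Char) (rules : List (List Char)) :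
    t ∈ hirBSet rules ↔ t ≠ [] ∧ ∃ r ∈ rules, PySem.Chars.strip r = t := by
  have key : ∀ (rs : List (List Char)) (s : PySem.Set (List Char)),
      t ∈ rs.foldl (fun s r =>
        let u := PySem.Chars.strip r
        if u = [] then s else PySem.Set.add s u) s ↔
      t ∈ s ∨ (t ≠ [] ∧ ∃ r ∈ rs, PySem.Chars.strip r = t) := by
    intro rs
    induction rs with
    | nil => simp
    | cons r rest ih =>
      intro s
      simp only [List.foldl_cons]
      split_ifs with h1
      · rw [ih]
        constructor
        · rintro (hs | ⟨hne, x, hx, hsx⟩)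
          · exact Or.inl hs
          · exact Or.inr ⟨hne, x, List.mem_cons_of_mem _ hx, hsx⟩
        · rintro (hs | ⟨hne, x, hx, hsx⟩)
          · exact Or.inl hs
          · rcases List.mem_cons.mp hx with rfl | hx'
            · exact absurd (by rw [← hsx, h1]) hne
            · exact Or.inr ⟨hne, x, hx', hsx⟩
      · rw [ih, PySem.Set.mem_add]
        constructor
        · rintro ((hs | rfl) | ⟨hne, x, hx, hsx⟩)
          · exact Or.inl hs
          · exact Or.inr ⟨h1, r, List.mem_cons_self, rfl⟩
          · exact Or.inr ⟨hne, x, List.mem_cons_of_mem _ hx, hsx⟩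
        · rintro (hs | ⟨hne, x, hx, hsx⟩)
          · exact Or.inl (Or.inl hs)
          · rcases List.mem_cons.mp hx with rfl | hx'
            · exact Or.inl (Or.inr hsx.symm)
            · exact Or.inr ⟨hne, x, hx', hsx⟩
  simpa [hirBSet] using key rules PySem.Set.empty

-- endswith with a leading dot ↔ some dot position whose tail equals the rule
theorem endswith_dot_iff (h t : List Char) :
    PySem.Chars.endswith h ('.' :: t) = true ↔
      ∃ i < h.length, h.drop i = '.' :: t := by
  rw [PySem.Chars.endswith_iff]
  constructor
  · rintro ⟨p, hp⟩
    refine ⟨p.length, ?_, ?_⟩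
    · rw [← hp]; simp
    · rw [← hp]; simp
  · rintro ⟨i, _, hd⟩
    exact ⟨h.take i, by rw [← hd]; exact List.take_append_drop i h⟩

theorem host_in_rules_py_true_iff (host : String) (rules : List String) :
    host_in_rules_py host rules = true ↔ host_in_rules_py_alt host rules = true := by
  unfold host_in_rules_py host_in_rules_py_alt
  rw [hirALoop_true_iff]
  set h := host.toList with hh
  set rl := rules.map String.toList with hrl
  by_cases hmem : PySem.Set.contains (hirBSet rl) h = true
  · simp only [hmem, if_true]
    obtain ⟨hne, r, hr, hsr⟩ := (mem_hirBSet h rl).mp ((PySem.Set.contains_iff _ _).mp hmem)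
    simp only [iff_true]
    exact ⟨r, hr, by rw [hsr]; exact hne, Or.inl hsr.symm⟩
  · simp only [hmem, if_false, Bool.false_eq_true]
    rw [List.any_eq_true]
    constructor
    · rintro ⟨r, hr, hne, hor⟩
      rcases hor with heq | hend
      · exact absurd ((PySem.Set.contains_iff _ _).mpr ((mem_hirBSet h rl).mpr
          ⟨by rw [heq]; exact fun hh0 => hne (heq ▸ hh0), r, hr, heq.symm⟩)) hmem
      · obtain ⟨i, hi, hd⟩ := (endswith_dot_iff h _).mp hend
        rw [List.drop_eq_getElem_cons hi, List.cons.injEq] at hd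
        obtain ⟨hdot, htail⟩ := hd
        refine ⟨i, List.mem_range.mpr hi, ?_⟩
        rw [PySem.List.pyGet?_natCast, List.getElem?_eq_getElem hi, hdot]
        simp only [beq_self_eq_true, Bool.true_and]
        exact (PySem.Set.contains_iff _ _).mpr ((mem_hirBSet _ rl).mpr ⟨htail ▸ hne, r, hr, htail.symm⟩)
    · rintro ⟨i, hi, hcond⟩
      rw [List.mem_range] at hi
      rw [Bool.and_eq_true, beq_iff_eq] at hcond
      obtain ⟨hget, hin⟩ := hcond
      obtain ⟨hne, r, hr, hsr⟩ := (mem_hirBSet _ rl).mp ((PySem.Set.contains_iff _ _).mp hin)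
      refine ⟨r, hr, by rw [hsr]; exact hne, Or.inr ?_⟩
      rw [PySem.List.pyGet?_natCast, List.getElem?_eq_getElem hi, Option.some_inj] at hget
      rw [hsr, endswith_dot_iff]
      exact ⟨i, hi, by rw [List.drop_eq_getElem_cons hi, hget]⟩

-- ===== VERDICT (by name: the statement is the Claim_ definition above) =====
theorem host_in_rules_py_spec : Claim_equal_host_in_rules_py := by
  intro host rules _
  unfold Spec_host_in_rules_py
  rw [Bool.eq_iff_iff]
  exact host_in_rules_py_true_iff host rules
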